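-- pv_equiv track=rewrite | github.com/kikoooiemama/YaContestAlgs24 | Contest_02/2G/02G.py | find_max_len_substring
-- ===== SOURCE A (Python) =====
-- def find_max_len_substring(n, c, s):
--     if n == 1:
--         return 1
--     # c - может быть 0!!!
--     count_a = count_b = cur_c = 0  # подсчет текущей грубости, a, b
--     i = r = best_l = best_r = 0  # 2 указателя
--     while r < n:
--         # добавление
--         if s[r] == 'a':
--             count_a += 1
--         elif s[r] == 'b':
--             count_b += 1
--             cur_c += count_a
--         # Грубость подстроки в пределах допустимого
--         if cur_c <= c:
--             if r - i > best_r - best_l: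
--                 best_r, best_l = r, i
--             r += 1
--         # Грубость подстроки вышла за рамки
--         else:
--             while i < n and cur_c > c:
--                 if s[i] == 'a':
--                     count_a -= 1
--                     cur_c -= count_b
--                 if s[i] == 'b':
--                     count_b -= 1
--                 i += 1
--             if cur_c <= c:
--                 if r - i > best_r - best_l:
--                     best_r, best_l = r, i
--                 r += 1
--
--     return best_r - best_l + 1
-- ===== SOURCE B (Python) =====
-- def find_max_len_substring(n, c, s):
--     # Independent per-end-index scan: for each r, walk left greedily while the
--     # inversion ("ab" pair) count stays within c; no state is shared between r's.
--     if n <= 1: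
--         return 1
--     best = 1
--     for r in range(n):
--         count_b = 1 if s[r] == 'b' else 0
--         cur = 0
--         l = r
--         while l > 0:
--             ch = s[l - 1]
--             add = count_b if ch == 'a' else 0
--             if cur + add > c:
--                 break
--             cur += add
--             if ch == 'b':
--                 count_b += 1
--             l -= 1
--         best = max(best, r - l + 1)
--     return best
-- ===== Notes on version B (the rewrite author's own statement) =====
-- stated objective: simpler
-- what changed: Replaces A's stateful two-pointer sliding window (shared left pointer, running a/b counts and best-window pair carried across the whole sweep) with an independent backward greedy scan from each end index r, extending left while the inversion count stays within c; each iteration is self-contained and only a best length is kept.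
-- outside the precondition, e.g. on find_max_len_substring(2, -1, 'ba'): A returns 1, B returns 1
import Mathlib
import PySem

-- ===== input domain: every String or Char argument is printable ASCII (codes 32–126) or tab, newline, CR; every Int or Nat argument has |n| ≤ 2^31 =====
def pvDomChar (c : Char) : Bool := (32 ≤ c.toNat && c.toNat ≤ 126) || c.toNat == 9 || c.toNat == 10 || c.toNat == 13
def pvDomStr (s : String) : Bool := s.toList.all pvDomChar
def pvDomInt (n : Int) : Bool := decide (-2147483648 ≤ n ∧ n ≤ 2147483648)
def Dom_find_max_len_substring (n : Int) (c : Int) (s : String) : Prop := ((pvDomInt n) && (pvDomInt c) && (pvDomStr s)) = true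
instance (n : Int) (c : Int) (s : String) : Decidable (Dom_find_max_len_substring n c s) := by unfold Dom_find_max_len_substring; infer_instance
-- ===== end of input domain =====

-- B replaces A's stateful two-pointer sweep by an independent backward scan from each
-- end index (simpler per-iteration reasoning, no shared window state); same results.

-- ===== PORT A =====
-- inner `while i < n and cur_c > c` loop of A
def pvInnerA (s : String) (n c : Int) (i count_a count_b cur_c : Int) :
    Option (Int × Int × Int × Int) :=
  if _h : i < n ∧ c < cur_c then
    match PySem.Str.pyGet? s i with
    | none => none
    | some ch =>
      let p := if ch = 'a' then (count_a - 1, cur_c - count_b) else (count_a, cur_c)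
      let cb := if ch = 'b' then count_b - 1 else count_b
      pvInnerA s n c (i + 1) p.1 cb p.2
  else some (i, count_a, count_b, cur_c)
termination_by (n - i).toNat
decreasing_by omega

-- outer `while r < n` loop of A (fuel = enough iterations; Python diverges when c < 0,
-- which Pre_ excludes)
def pvOuterA (s : String) (n c : Int) (fuel : Nat)
    (i r count_a count_b cur_c best_l best_r : Int) : Option Int :=
  match fuel with
  | 0 => none
  | Nat.succ fuel =>
    if r < n then
      match PySem.Str.pyGet? s r with
      | none => none
      | some ch =>
        let t := if ch = 'a' then (count_a + 1, count_b, cur_c)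
                 else if ch = 'b' then (count_a, count_b + 1, cur_c + count_a)
                 else (count_a, count_b, cur_c)
        if t.2.2 ≤ c then
          let b := if best_r - best_l < r - i then (i, r) else (best_l, best_r)
          pvOuterA s n c fuel i (r + 1) t.1 t.2.1 t.2.2 b.1 b.2
        else
          match pvInnerA s n c i t.1 t.2.1 t.2.2 with
          | none => none
          | some (i', ca', cb', cur') =>
            if cur' ≤ c then
              let b := if best_r - best_l < r - i' then (i', r) else (best_l, best_r)
              pvOuterA s n c fuel i' (r + 1) ca' cb' cur' b.1 b.2
            else
              pvOuterA s n c fuel i' r ca' cb' cur' best_l best_r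
    else some (best_r - best_l + 1)

def find_max_len_substring (n : Int) (c : Int) (s : String) : Int :=
  if n = 1 then 1
  else (pvOuterA s n c (n.toNat + 1) 0 0 0 0 0 0 0).getD 0

-- ===== PORT B =====
-- B's inner `while l > 0` backward scan
def pvInnerB (s : String) (c : Int) (l count_b cur : Int) : Option Int :=
  if _h : 0 < l then
    match PySem.Str.pyGet? s (l - 1) with
    | none => none
    | some ch =>
      let add := if ch = 'a' then count_b else 0
      if c < cur + add then some l
      else pvInnerB s c (l - 1) (if ch = 'b' then count_b + 1 else count_b) (cur + add)
  else some l
termination_by l.toNat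
decreasing_by omega

-- B's `for r in range(n)` loop
def pvOuterB (s : String) (n c : Int) (r best : Int) : Option Int :=
  if _h : r < n then
    match PySem.Str.pyGet? s r with
    | none => none
    | some ch =>
      match pvInnerB s c r (if ch = 'b' then 1 else 0) 0 with
      | none => none
      | some l => pvOuterB s n c (r + 1) (max best (r - l + 1))
  else some best
termination_by (n - r).toNat
decreasing_by omega

def find_max_len_substring_alt (n : Int) (c : Int) (s : String) : Int :=
  if n ≤ 1 then 1
  else (pvOuterB s n c 0 1).getD 0

-- ===== PRECONDITION & SPEC =====
-- Pre_ excludes, for n ≥ 2 only, c < 0 — where A's two-pointer loop in general never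
-- terminates (its fuelled port is only claimed there where nothing is claimed), and the
-- rare c < 0 inputs on which leftover negative counts make A return are corners on which
-- B agrees anyway — and n > len(s), where A raises IndexError on s[r]; for n ≤ 1 A
-- returns 1 without looping, so nothing is excluded.
def Pre_find_max_len_substring (n : Int) (c : Int) (s : String) : Prop :=
  n ≤ 1 ∨ (0 ≤ c ∧ n ≤ (s.toList.length : Int))
instance (n : Int) (c : Int) (s : String) : Decidable (Pre_find_max_len_substring n c s) := by
  unfold Pre_find_max_len_substring; infer_instance

def pvWitness_find_max_len_substring : Int × Int × String := (3, 1, "aba")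

def Spec_find_max_len_substring (n : Int) (c : Int) (s : String) (out : Int) : Prop := out = find_max_len_substring_alt n c s
instance (n : Int) (c : Int) (s : String) (out : Int) : Decidable (Spec_find_max_len_substring n c s out) := by unfold Spec_find_max_len_substring; infer_instance

-- ===== CLAIM (what is proved, stated in full; the proofs are below) =====
def Claim_equal_find_max_len_substring : Prop := ∀ (n : Int) (c : Int) (s : String), Dom_find_max_len_substring n c s → Pre_find_max_len_substring n c s → Spec_find_max_len_substring n c s (find_max_len_substring n c s)

-- ===== LEMMAS AND PROOFS =====

-- number of 'a' / 'b' in a window, and the "ab"-inversion count A and B both track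
def pvCA (t : List Char) : Int := (t.count 'a' : Int)
def pvCB (t : List Char) : Int := (t.count 'b' : Int)
def pvInv : List Char → Int
  | [] => 0
  | x :: t => (if x = 'a' then pvCB t else 0) + pvInv t

-- the window s[l:e]
def pvW (xs : List Char) (l e : Nat) : List Char := (xs.drop l).take (e - l)

lemma pvCA_nonneg (t : List Char) : 0 ≤ pvCA t := Int.natCast_nonneg _
lemma pvCB_nonneg (t : List Char) : 0 ≤ pvCB t := Int.natCast_nonneg _

lemma pvCA_cons (x : Char) (t : List Char) :
    pvCA (x :: t) = (if x = 'a' then 1 else 0) + pvCA t := by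
  simp [pvCA, List.count_cons]; split <;> omega

lemma pvCB_cons (x : Char) (t : List Char) :
    pvCB (x :: t) = (if x = 'b' then 1 else 0) + pvCB t := by
  simp [pvCB, List.count_cons]; split <;> omega

lemma pvCA_append1 (t : List Char) (x : Char) :
    pvCA (t ++ [x]) = pvCA t + (if x = 'a' then 1 else 0) := by
  simp [pvCA, List.count_append, List.count_cons]

lemma pvCB_append1 (t : List Char) (x : Char) :
    pvCB (t ++ [x]) = pvCB t + (if x = 'b' then 1 else 0) := by
  simp [pvCB, List.count_append, List.count_cons]

lemma pvInv_append1 (t : List Char) (x : Char) :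
    pvInv (t ++ [x]) = pvInv t + (if x = 'b' then pvCA t else 0) := by
  induction t with
  | nil => simp [pvInv, pvCA, pvCB]
  | cons y t ih =>
    simp only [List.cons_append, pvInv, ih, pvCB_append1, pvCA_cons]
    split_ifs <;> simp_all
    omega

lemma pvW_nil (xs : List Char) (l : Nat) : pvW xs l l = [] := by simp [pvW]

lemma pvW_cons (xs : List Char) {l e : Nat} (hl : l < e) (hx : l < xs.length) :
    pvW xs l e = xs[l] :: pvW xs (l + 1) e := by
  unfold pvW
  rw [List.drop_eq_getElem_cons hx]
  rw [show e - l = (e - (l + 1)) + 1 by omega, List.take_succ_cons]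

lemma pvW_append (xs : List Char) {l e : Nat} (hl : l ≤ e) (he : e < xs.length) :
    pvW xs l (e + 1) = pvW xs l e ++ [xs[e]] := by
  unfold pvW
  rw [show e + 1 - l = (e - l) + 1 by omega, List.take_add_one]
  congr 1
  rw [List.getElem?_drop, show l + (e - l) = e by omega, List.getElem?_eq_getElem he]
  rfl

lemma pvW_single (xs : List Char) {e : Nat} (he : e < xs.length) :
    pvW xs e (e + 1) = [xs[e]] := by
  rw [pvW_cons xs (Nat.lt_succ_self e) he, pvW_nil]

lemma pvInv_single (x : Char) : pvInv [x] = 0 := by simp [pvInv, pvCB]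

lemma pvCB_single (x : Char) : pvCB [x] = if x = 'b' then 1 else 0 := by
  rw [show [x] = x :: ([] : List Char) from rfl, pvCB_cons]; simp [pvCB]

lemma pvInv_drop_le (xs : List Char) {l e : Nat} (hl : l < e) (he : e ≤ xs.length) :
    pvInv (pvW xs (l + 1) e) ≤ pvInv (pvW xs l e) := by
  rw [pvW_cons xs hl (lt_of_lt_of_le hl he)]
  have := pvCB_nonneg (pvW xs (l + 1) e)
  simp only [pvInv]; split <;> omega

lemma pvInv_anti (xs : List Char) {e : Nat} (he : e ≤ xs.length)
    {k l : Nat} (hkl : k ≤ l) (hle : l ≤ e) :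
    pvInv (pvW xs l e) ≤ pvInv (pvW xs k e) := by
  induction l, hkl using Nat.le_induction with
  | base => exact le_refl _
  | succ l hkl ih =>
    exact le_trans (pvInv_drop_le xs (by omega) he) (ih (by omega))

lemma pvInv_mono_e (xs : List Char) {l e : Nat} (hl : l ≤ e) (he : e < xs.length) :
    pvInv (pvW xs l e) ≤ pvInv (pvW xs l (e + 1)) := by
  rw [pvW_append xs hl he, pvInv_append1]
  have := pvCA_nonneg (pvW xs l e)
  split <;> omega

lemma pvW_pred (xs : List Char) {e : Nat} (h1 : 0 < e) (h2 : e ≤ xs.length) :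
    pvW xs (e - 1) e = [xs[e - 1]'(by omega)] := by
  have h := pvW_single xs (e := e - 1) (by omega)
  rwa [show e - 1 + 1 = e by omega] at h

-- B's backward scan finds the least valid left end for the window ending at e-1
lemma pvInnerB_spec (s : String) (c : Int) (e : Nat) (he : e ≤ s.toList.length) :
    ∀ (l : Nat), l < e → pvInv (pvW s.toList l e) ≤ c →
    ∃ l' : Nat, l' ≤ l ∧
      pvInnerB s c (l : Int) (pvCB (pvW s.toList l e)) (pvInv (pvW s.toList l e)) = some (l' : Int) ∧
      pvInv (pvW s.toList l' e) ≤ c ∧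
      ∀ k, k < l' → c < pvInv (pvW s.toList k e) := by
  intro l
  induction l with
  | zero =>
    intro _hle hcur
    refine ⟨0, le_refl _, ?_, hcur, fun k hk => absurd hk (by omega)⟩
    rw [pvInnerB]
    simp
  | succ m ih =>
    intro hle hcur
    have hm : m < s.toList.length := by omega
    have hch : PySem.Str.pyGet? s (((m + 1 : Nat) : Int) - 1) = some s.toList[m] := by
      rw [show ((m + 1 : Nat) : Int) - 1 = ((m : Nat) : Int) by push_cast; ring]
      rw [PySem.Str.pyGet?_natCast, List.getElem?_eq_getElem hm]
    have hWc : pvW s.toList m e = s.toList[m] :: pvW s.toList (m + 1) e :=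
      pvW_cons _ (by omega) hm
    have hinv : pvInv (pvW s.toList (m + 1) e)
        + (if s.toList[m] = 'a' then pvCB (pvW s.toList (m + 1) e) else 0)
        = pvInv (pvW s.toList m e) := by
      rw [hWc]; simp only [pvInv]; ring
    have hcb : pvCB (pvW s.toList m e)
        = if s.toList[m] = 'b' then pvCB (pvW s.toList (m + 1) e) + 1
          else pvCB (pvW s.toList (m + 1) e) := by
      rw [hWc, pvCB_cons]; split <;> ring
    rw [pvInnerB, dif_pos (by push_cast; omega), hch]
    simp only
    by_cases hbr : c < pvInv (pvW s.toList (m + 1) e)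
        + (if s.toList[m] = 'a' then pvCB (pvW s.toList (m + 1) e) else 0)
    · rw [if_pos hbr]
      refine ⟨m + 1, le_refl _, rfl, hcur, ?_⟩
      intro k hk
      have h2 : pvInv (pvW s.toList m e) ≤ pvInv (pvW s.toList k e) :=
        pvInv_anti _ he (by omega) (by omega)
      omega
    · rw [if_neg hbr]
      rw [show ((m + 1 : Nat) : Int) - 1 = ((m : Nat) : Int) by push_cast; ring]
      rw [← hcb, hinv]
      obtain ⟨l', hl', heq, hval, hmin⟩ := ih (by omega) (by omega)
      exact ⟨l', by omega, heq, hval, hmin⟩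

-- A's inner while loop advances i to the least valid left end, keeping the counts exact
lemma pvInnerA_spec (s : String) (c n : Int) (hc : 0 ≤ c) (nN : Nat) (hn : n = (nN : Int))
    (e : Nat) (he : e ≤ s.toList.length) (hen : e ≤ nN) :
    ∀ (d i : Nat), e - i ≤ d → i < e →
    ∃ i' : Nat, i ≤ i' ∧ i' < e ∧
      pvInnerA s n c (i : Int) (pvCA (pvW s.toList i e)) (pvCB (pvW s.toList i e)) (pvInv (pvW s.toList i e))
        = some ((i' : Int), pvCA (pvW s.toList i' e), pvCB (pvW s.toList i' e), pvInv (pvW s.toList i' e)) ∧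
      pvInv (pvW s.toList i' e) ≤ c ∧
      ∀ k, i ≤ k → k < i' → c < pvInv (pvW s.toList k e) := by
  intro d
  induction d with
  | zero => intro i h0 hie; exact absurd hie (by omega)
  | succ d ih =>
    intro i hd hie
    by_cases hcur : c < pvInv (pvW s.toList i e)
    · have hie1 : i < e - 1 := by
        by_contra hco
        have hieq : i = e - 1 := by omega
        have h0 : pvInv (pvW s.toList i e) = 0 := by
          rw [hieq, pvW_pred s.toList (by omega) he, pvInv_single]
        omega
      have hin : (i : Int) < n := by omega
      rw [pvInnerA, dif_pos ⟨hin, hcur⟩]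
      have hch : PySem.Str.pyGet? s ((i : Nat) : Int) = some s.toList[i] := by
        rw [PySem.Str.pyGet?_natCast, List.getElem?_eq_getElem (by omega : i < s.toList.length)]
      rw [hch]
      simp only
      have hWc : pvW s.toList i e = s.toList[i] :: pvW s.toList (i + 1) e :=
        pvW_cons _ (by omega) (by omega)
      have hp : (if s.toList[i] = 'a'
            then (pvCA (pvW s.toList i e) - 1,
                  pvInv (pvW s.toList i e) - pvCB (pvW s.toList i e))
            else (pvCA (pvW s.toList i e), pvInv (pvW s.toList i e)))
          = (pvCA (pvW s.toList (i + 1) e), pvInv (pvW s.toList (i + 1) e)) := by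
        rw [hWc, pvCA_cons, pvCB_cons]
        simp only [pvInv]
        split_ifs <;> simp_all
      have hcb2 : (if s.toList[i] = 'b' then pvCB (pvW s.toList i e) - 1
            else pvCB (pvW s.toList i e)) = pvCB (pvW s.toList (i + 1) e) := by
        rw [hWc, pvCB_cons]
        split_ifs <;> simp_all
      rw [hp, hcb2]
      rw [show (i : Int) + 1 = ((i + 1 : Nat) : Int) by push_cast; ring]
      obtain ⟨i', h1, h2, heq, hval, hmin⟩ := ih (i + 1) (by omega) (by omega)
      refine ⟨i', by omega, h2, heq, hval, ?_⟩
      intro k hk1 hk2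
      rcases eq_or_lt_of_le hk1 with h | h
      · rw [← h]; exact hcur
      · exact hmin k (by omega) hk2
    · refine ⟨i, le_refl _, hie, ?_, by omega, fun k h1 h2 => absurd h1 (by omega)⟩
      rw [pvInnerA, dif_neg (fun h => hcur h.2)]

lemma pvOuterA_term (s : String) (n c : Int) (f : Nat) (i r ca cb cur bl br : Int)
    (hr : ¬ r < n) :
    pvOuterA s n c (f + 1) i r ca cb cur bl br = some (br - bl + 1) := by
  simp only [pvOuterA]
  rw [if_neg hr]

lemma pvOuterB_term (s : String) (n c : Int) (r best : Int) (hr : ¬ r < n) :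
    pvOuterB s n c r best = some best := by
  rw [pvOuterB, dif_neg hr]

-- the two outer loops agree step by step
lemma pvOuter_eq (s : String) (c n : Int) (hc : 0 ≤ c) (nN : Nat)
    (hn : n = (nN : Int)) (hlen : nN ≤ s.toList.length) :
    ∀ (d r : Nat), nN - r ≤ d → r ≤ nN →
    ∀ (fuel : Nat), nN - r < fuel →
    ∀ (i : Nat), i ≤ r →
    ∀ (bl br bestB : Int), bestB = br - bl + 1 →
    (∀ k, k < i → c < pvInv (pvW s.toList k r)) →
    pvInv (pvW s.toList i r) ≤ c →
    pvOuterA s n c fuel (i : Int) (r : Int) (pvCA (pvW s.toList i r)) (pvCB (pvW s.toList i r)) (pvInv (pvW s.toList i r)) bl br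
      = pvOuterB s n c (r : Int) bestB := by
  intro d
  induction d with
  | zero =>
    intro r hrd hrn fuel hfuel i hi bl br bestB hbest hmin hval
    cases fuel with
    | zero => omega
    | succ f =>
      rw [pvOuterA_term _ _ _ _ _ _ _ _ _ _ _ (by omega),
        pvOuterB_term _ _ _ _ _ (by omega), hbest]
  | succ d ih =>
    intro r hrd hrn fuel hfuel i hi bl br bestB hbest hmin hval
    by_cases hterm : r = nN
    · cases fuel with
      | zero => omega
      | succ f =>
        rw [pvOuterA_term _ _ _ _ _ _ _ _ _ _ _ (by omega),
          pvOuterB_term _ _ _ _ _ (by omega), hbest]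
    · have hrlt : r < nN := by omega
      cases fuel with
      | zero => omega
      | succ f =>
      have hrlen : r < s.toList.length := by omega
      have hch : PySem.Str.pyGet? s ((r : Nat) : Int) = some s.toList[r] := by
        rw [PySem.Str.pyGet?_natCast, List.getElem?_eq_getElem hrlen]
      simp only [pvOuterA]
      rw [if_pos (by omega : (r : Int) < n), hch]
      simp only
      have hW1 : pvW s.toList i (r + 1) = pvW s.toList i r ++ [s.toList[r]] :=
        pvW_append _ hi hrlen
      have ht : (if s.toList[r] = 'a'
            then (pvCA (pvW s.toList i r) + 1, pvCB (pvW s.toList i r), pvInv (pvW s.toList i r))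
            else if s.toList[r] = 'b'
            then (pvCA (pvW s.toList i r), pvCB (pvW s.toList i r) + 1,
                  pvInv (pvW s.toList i r) + pvCA (pvW s.toList i r))
            else (pvCA (pvW s.toList i r), pvCB (pvW s.toList i r), pvInv (pvW s.toList i r)))
          = (pvCA (pvW s.toList i (r + 1)), pvCB (pvW s.toList i (r + 1)),
             pvInv (pvW s.toList i (r + 1))) := by
        rw [hW1, pvCA_append1, pvCB_append1, pvInv_append1]
        split_ifs with h1 h2 <;> simp_all
      rw [ht]
      have hsingle : pvW s.toList r (r + 1) = [s.toList[r]] := pvW_single _ hrlen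
      obtain ⟨l', hl'le, hBeq, hBval, hBmin⟩ :=
        pvInnerB_spec s c (r + 1) (by omega) r (by omega)
          (by rw [hsingle, pvInv_single]; omega)
      have hBargs : pvInnerB s c ((r : Nat) : Int) (if s.toList[r] = 'b' then 1 else 0) 0
          = some ((l' : Nat) : Int) := by
        have e1 : pvCB (pvW s.toList r (r + 1)) = if s.toList[r] = 'b' then 1 else 0 := by
          rw [hsingle, pvCB_single]
        have e2 : pvInv (pvW s.toList r (r + 1)) = 0 := by rw [hsingle, pvInv_single]
        rw [← e1, ← e2]; exact hBeq
      have hBstep : pvOuterB s n c (r : Int) bestB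
          = pvOuterB s n c ((r : Int) + 1) (max bestB ((r : Int) - ((l' : Nat) : Int) + 1)) := by
        rw [pvOuterB, dif_pos (show (r : Int) < n by omega), hch]
        simp only
        rw [hBargs]
      rw [hBstep]
      have hminlift : ∀ k, k < i → c < pvInv (pvW s.toList k (r + 1)) := fun k hk =>
        lt_of_lt_of_le (hmin k hk) (pvInv_mono_e _ (by omega) hrlen)
      by_cases hv2 : pvInv (pvW s.toList i (r + 1)) ≤ c
      · rw [if_pos hv2]
        have hiq : i = l' := by
          rcases lt_trichotomy i l' with h | h | h
          · exact absurd hv2 (not_le.mpr (hBmin i h))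
          · exact h
          · exact absurd hBval (not_le.mpr (hminlift l' h))
        have hrec := ih (r + 1) (by omega) (by omega) f (by omega) i (by omega)
        by_cases hbc : br - bl < (r : Int) - (i : Int)
        · rw [if_pos hbc]
          have h9 := hrec (i : Int) (r : Int) (max bestB ((r : Int) - (l' : Int) + 1))
            (by rw [← hiq]; omega) hminlift hv2
          push_cast at h9 ⊢
          exact h9
        · rw [if_neg hbc]
          have h9 := hrec bl br (max bestB ((r : Int) - (l' : Int) + 1))
            (by rw [← hiq]; omega) hminlift hv2
          push_cast at h9 ⊢
          exact h9
      · rw [if_neg hv2]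
        obtain ⟨i', hii', hi'e, hAeq, hAval, hAmin⟩ :=
          pvInnerA_spec s c n hc nN hn (r + 1) (by omega) (by omega) (r + 1) i (by omega)
            (by omega)
        rw [hAeq]
        simp only
        rw [if_pos hAval]
        have hminA : ∀ k, k < i' → c < pvInv (pvW s.toList k (r + 1)) := by
          intro k hk
          by_cases hki : k < i
          · exact hminlift k hki
          · exact hAmin k (by omega) hk
        have hiq : i' = l' := by
          rcases lt_trichotomy i' l' with h | h | h
          · exact absurd hAval (not_le.mpr (hBmin i' h))
          · exact h
          · exact absurd hBval (not_le.mpr (hminA l' h))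
        have hrec := ih (r + 1) (by omega) (by omega) f (by omega) i' (by omega)
        by_cases hbc : br - bl < (r : Int) - (i' : Int)
        · rw [if_pos hbc]
          have h9 := hrec (i' : Int) (r : Int) (max bestB ((r : Int) - (l' : Int) + 1))
            (by rw [← hiq]; omega) hminA hAval
          push_cast at h9 ⊢
          exact h9
        · rw [if_neg hbc]
          have h9 := hrec bl br (max bestB ((r : Int) - (l' : Int) + 1))
            (by rw [← hiq]; omega) hminA hAval
          push_cast at h9 ⊢
          exact h9

-- ===== VERDICT (by name: the statement is the Claim_ definition above) =====
theorem find_max_len_substring_spec : Claim_equal_find_max_len_substring := by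
  intro n c s _hdom hpre
  show find_max_len_substring n c s = find_max_len_substring_alt n c s
  unfold find_max_len_substring find_max_len_substring_alt
  by_cases h1 : n = 1
  · simp [h1]
  · by_cases h0 : n ≤ 1
    · have hng : ¬ ((0 : Int) < n) := by omega
      simp [h0, h1, pvOuterA, hng]
    · obtain ⟨hc, hlen⟩ : 0 ≤ c ∧ n ≤ (s.toList.length : Int) := by
        rcases hpre with h | h
        · omega
        · exact h
      have hn2 : (2 : Int) ≤ n := by omega
      have hnn : n = ((n.toNat : Nat) : Int) := by omega
      have heq := pvOuter_eq s c n hc n.toNat hnn (by omega) n.toNat 0 (by omega) (by omega)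
        (n.toNat + 1) (by omega) 0 (by omega) 0 0 1 (by omega)
        (by intro k hk; omega)
        (by rw [pvW_nil]; simpa [pvInv] using hc)
      rw [pvW_nil] at heq
      simp only [pvCA, pvCB, pvInv, List.count_nil, Nat.cast_zero] at heq
      simp only [h0, h1, if_false]
      rw [heq]
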